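-- pv_equiv track=rewrite | github.com/Blueberry1043/481hw6QAEvidence | isDeterministic.py | parse_primal_output
-- ===== SOURCE A (Python) =====
-- def parse_primal_output(output):
-- 	aLines = output.split('\n')
-- 	aRet = []
-- 	aFirst = []
-- 	aSecond = []
-- 	aThird = []
-- 	count = 0
-- 	for line in aLines:
-- 		aWords = line.split()
-- 		if aWords and aWords[0].startswith('|-primal|'):
-- 			if count < 4:
-- 				aFirst.append(aWords[0].replace('|-primal|',''))
-- 			elif count < 8:
-- 				aSecond.append(aWords[0].replace('|-primal|',''))
-- 			else:
-- 				aThird.append(aWords[0].replace('|-primal|',''))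
-- 			count += 1
-- 	aRet.append(aFirst)
-- 	aRet.append(aSecond)
-- 	aRet.append(aThird)
-- 	return aRet
-- ===== SOURCE B (Python) =====
-- def parse_primal_output(output):
-- 	toks = [w[0].replace('|-primal|', '')
-- 	        for line in output.split('\n')
-- 	        if (w := line.split()) and w[0].startswith('|-primal|')]
-- 	return [toks[:4], toks[4:8], toks[8:]]
-- ===== Notes on version B (the rewrite author's own statement) =====
-- stated objective: simpler
-- what changed: Replaced the running count with three if/elif/else bucket appends by a single filtering comprehension that builds the flat token list, then partitions it into the three buckets by slicing toks[:4], toks[4:8], toks[8:].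
import Mathlib
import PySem

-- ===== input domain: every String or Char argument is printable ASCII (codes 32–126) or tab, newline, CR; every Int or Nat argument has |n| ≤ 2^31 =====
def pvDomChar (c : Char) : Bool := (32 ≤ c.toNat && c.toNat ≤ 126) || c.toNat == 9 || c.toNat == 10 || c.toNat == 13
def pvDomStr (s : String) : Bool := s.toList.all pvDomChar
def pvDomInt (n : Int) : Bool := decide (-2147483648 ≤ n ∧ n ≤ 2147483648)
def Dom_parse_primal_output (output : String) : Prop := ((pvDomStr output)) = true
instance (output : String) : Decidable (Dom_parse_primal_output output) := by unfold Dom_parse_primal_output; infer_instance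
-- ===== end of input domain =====

-- B replaces A's running count and if/elif/else bucketing by one filtering pass
-- building the flat token list, then slicing it into the three buckets (objective: simpler).

-- ===== PORT A =====
-- one loop step of A: (aFirst, aSecond, aThird, count) updated by one line
def pvStepA (st : List String × List String × List String × Int) (line : String) :
    List String × List String × List String × Int :=
  match PySem.Str.split₀ line with
  | [] => st
  | w :: _ =>
    if PySem.Str.startswith w "|-primal|" then
      if st.2.2.2 < 4 then
        (st.1 ++ [PySem.Str.replace w "|-primal|" ""], st.2.1, st.2.2.1, st.2.2.2 + 1)
      else if st.2.2.2 < 8 then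
        (st.1, st.2.1 ++ [PySem.Str.replace w "|-primal|" ""], st.2.2.1, st.2.2.2 + 1)
      else
        (st.1, st.2.1, st.2.2.1 ++ [PySem.Str.replace w "|-primal|" ""], st.2.2.2 + 1)
    else st

def parse_primal_output (output : String) : List (List String) :=
  -- output.split('\n'): sep ≠ "" so split? is always `some`
  let aLines := (PySem.Str.split? output "\n").getD []
  let r := aLines.foldl pvStepA ([], [], [], 0)
  [r.1, r.2.1, r.2.2.1]

-- ===== PORT B =====
-- the cleaned token of one line, if it matches (the comprehension's filter+map)
def pvTok? (line : String) : Option String :=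
  match PySem.Str.split₀ line with
  | [] => none
  | w :: _ =>
    if PySem.Str.startswith w "|-primal|" then some (PySem.Str.replace w "|-primal|" "")
    else none

def parse_primal_output_alt (output : String) : List (List String) :=
  let toks := (((PySem.Str.split? output "\n").getD []).filterMap pvTok?)
  [toks.take 4, (toks.drop 4).take 4, toks.drop 8]

-- ===== PRECONDITION & SPEC =====
def Spec_parse_primal_output (output : String) (out : List (List String)) : Prop := out = parse_primal_output_alt output
instance (output : String) (out : List (List String)) : Decidable (Spec_parse_primal_output output out) := by unfold Spec_parse_primal_output; infer_instance

-- ===== CLAIM (what is proved, stated in full; the proofs are below) =====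
def Claim_equal_parse_primal_output : Prop := ∀ (output : String), Dom_parse_primal_output output → Spec_parse_primal_output output (parse_primal_output output)

-- ===== LEMMAS AND PROOFS =====

-- loop invariant: A's state after processing a prefix whose tokens form `acc`
-- is exactly B's partition of `acc`, and the final state appends the remaining tokens
lemma pvLoopA_inv (lines : List String) : ∀ (acc : List String),
    lines.foldl pvStepA (acc.take 4, (acc.drop 4).take 4, acc.drop 8, (acc.length : Int)) =
      ((acc ++ lines.filterMap pvTok?).take 4,
       ((acc ++ lines.filterMap pvTok?).drop 4).take 4,
       (acc ++ lines.filterMap pvTok?).drop 8,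
       ((acc ++ lines.filterMap pvTok?).length : Int)) := by
  induction lines with
  | nil => intro acc; simp
  | cons line rest ih =>
    intro acc
    simp only [List.foldl_cons, List.filterMap_cons]
    have hstep : pvStepA (acc.take 4, (acc.drop 4).take 4, acc.drop 8, (acc.length : Int)) line =
        match pvTok? line with
        | none => (acc.take 4, (acc.drop 4).take 4, acc.drop 8, (acc.length : Int))
        | some w => ((acc ++ [w]).take 4, ((acc ++ [w]).drop 4).take 4,
                     (acc ++ [w]).drop 8, ((acc ++ [w]).length : Int)) := by
      unfold pvStepA pvTok?
      cases hs : PySem.Str.split₀ line with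
      | nil => rfl
      | cons w ws =>
        by_cases hp : PySem.Str.startswith w "|-primal|" = true
        · simp only [hp, if_true]
          by_cases h4 : acc.length < 4
          · have : ((acc.length : Int) < 4) := by exact_mod_cast h4
            simp only [this, if_true]
            have t1 : acc.take 4 = acc := List.take_of_length_le (by omega)
            have t2 : (acc ++ [PySem.Str.replace w "|-primal|" ""]).take 4 =
                acc ++ [PySem.Str.replace w "|-primal|" ""] :=
              List.take_of_length_le (by simp; omega)
            simp [t1, t2, List.drop_eq_nil_of_le, Nat.le_of_lt h4, show acc.length ≤ 8 by omega,
              show acc.length + 1 ≤ 4 by omega, show acc.length + 1 ≤ 8 by omega]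
          · have h4' : ¬ ((acc.length : Int) < 4) := by exact_mod_cast h4
            by_cases h8 : acc.length < 8
            · have : ((acc.length : Int) < 8) := by exact_mod_cast h8
              simp only [h4', if_false, this, if_true]
              have t1 : (acc ++ [PySem.Str.replace w "|-primal|" ""]).take 4 = acc.take 4 :=
                List.take_append_of_le_length (by omega)
              have t2 : (acc ++ [PySem.Str.replace w "|-primal|" ""]).drop 4 =
                  acc.drop 4 ++ [PySem.Str.replace w "|-primal|" ""] :=
                List.drop_append_of_le_length (by omega)
              have t3 : (acc.drop 4 ++ [PySem.Str.replace w "|-primal|" ""]).take 4 =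
                  acc.drop 4 ++ [PySem.Str.replace w "|-primal|" ""] :=
                List.take_of_length_le (by simp; omega)
              simp [t1, t2, t3, List.drop_eq_nil_of_le,
                show acc.length ≤ 8 by omega, show acc.length + 1 ≤ 8 by omega]
            · have h8' : ¬ ((acc.length : Int) < 8) := by exact_mod_cast h8
              simp only [h4', if_false, h8', if_false]
              have t1 : (acc ++ [PySem.Str.replace w "|-primal|" ""]).take 4 = acc.take 4 :=
                List.take_append_of_le_length (by omega)
              have t2 : (acc ++ [PySem.Str.replace w "|-primal|" ""]).drop 4 =
                  acc.drop 4 ++ [PySem.Str.replace w "|-primal|" ""] :=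
                List.drop_append_of_le_length (by omega)
              have t3 : (acc.drop 4 ++ [PySem.Str.replace w "|-primal|" ""]).take 4 =
                  (acc.drop 4).take 4 :=
                List.take_append_of_le_length (by simp; omega)
              have t4 : (acc ++ [PySem.Str.replace w "|-primal|" ""]).drop 8 =
                  acc.drop 8 ++ [PySem.Str.replace w "|-primal|" ""] :=
                List.drop_append_of_le_length (by omega)
              simp [t1, t2, t3, t4]
        · simp only [hp]; rfl
    cases ht : pvTok? line with
    | none => rw [hstep]; simp only [ht]; simpa using ih acc
    | some w =>
      rw [hstep]; simp only [ht]
      have := ih (acc ++ [w])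
      simpa using this

-- ===== VERDICT (by name: the statement is the Claim_ definition above) =====
theorem parse_primal_output_spec : Claim_equal_parse_primal_output := by
  intro output _
  unfold Spec_parse_primal_output parse_primal_output parse_primal_output_alt
  have := pvLoopA_inv ((PySem.Str.split? output "\n").getD []) []
  simp only [List.take_nil, List.drop_nil, List.length_nil, Nat.cast_zero, List.nil_append] at this
  simp [this]
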